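-- pv_equiv track=rewrite | github.com/eunaJung01/Algorithm-Solving | Programmers/Level_1/폰켄몬.py | solution
-- ===== SOURCE A (Python) =====
-- def solution(nums):
--     pokemons = dict()
--     for num in nums:
--         if num not in pokemons:
--             pokemons[num] = 1
--
--     get_cnt = len(nums) // 2
--     type_cnt = len(pokemons.keys())
--     if type_cnt <= get_cnt:
--         return type_cnt
--     return get_cnt
-- ===== SOURCE B (Python) =====
-- def solution(nums):
--     s = sorted(nums)
--     distinct = 0
--     prev = None
--     for x in s:
--         if prev is None or x != prev:
--             distinct += 1
--         prev = x
--     return min(distinct, len(nums) // 2)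
-- ===== Notes on version B (the rewrite author's own statement) =====
-- stated objective: alternative
-- what changed: Replaces the dict-membership counting of distinct values by a sort-then-adjacent-scan (count positions where the sorted copy changes), and the final branch by min().
import Mathlib
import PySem

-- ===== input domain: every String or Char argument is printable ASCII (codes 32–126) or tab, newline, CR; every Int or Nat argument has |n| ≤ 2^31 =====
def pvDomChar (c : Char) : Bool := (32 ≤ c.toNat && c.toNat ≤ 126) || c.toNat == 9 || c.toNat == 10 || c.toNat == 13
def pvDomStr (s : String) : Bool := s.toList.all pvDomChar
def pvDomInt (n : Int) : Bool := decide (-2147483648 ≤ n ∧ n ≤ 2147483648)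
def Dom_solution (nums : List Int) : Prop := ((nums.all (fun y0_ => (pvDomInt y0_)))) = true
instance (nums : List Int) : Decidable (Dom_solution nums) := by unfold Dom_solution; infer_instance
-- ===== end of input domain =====

-- B replaces A's dict-membership distinct counting by a sort-then-adjacent-scan; same result, alternative algorithm.

-- ===== PORT A =====
def solution (nums : List Int) : Int :=
  let pokemons := nums.foldl (fun d num => if d.contains num then d else d.insert num (1 : Int)) PySem.Dict.empty
  let get_cnt := PySem.Int.floordiv (nums.length : Int) 2
  let type_cnt := (pokemons.keys.length : Int)
  if type_cnt ≤ get_cnt then type_cnt else get_cnt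

-- ===== PORT B =====
def solution_alt (nums : List Int) : Int :=
  let s := PySem.List.sorted nums (fun x => x) false
  let st := s.foldl
    (fun (st : Int × Option Int) x =>
      ((if st.2 = none ∨ st.2 ≠ some x then st.1 + 1 else st.1), some x))
    ((0 : Int), (none : Option Int))
  min st.1 (PySem.Int.floordiv (nums.length : Int) 2)

-- ===== PRECONDITION & SPEC =====
def Spec_solution (nums : List Int) (out : Int) : Prop := out = solution_alt nums
instance (nums : List Int) (out : Int) : Decidable (Spec_solution nums out) := by unfold Spec_solution; infer_instance

-- ===== CLAIM (what is proved, stated in full; the proofs are below) =====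
def Claim_equal_solution : Prop := ∀ (nums : List Int), Dom_solution nums → Spec_solution nums (solution nums)

-- ===== LEMMAS AND PROOFS =====

-- A's dict loop only ever records keys: its keys are exactly Set.update of the start keys.
lemma keysA (l : List Int) (d : PySem.Dict Int Int) :
    (l.foldl (fun d n => if d.contains n then d else d.insert n (1 : Int)) d).keys
      = PySem.Set.update d.keys l := by
  induction l generalizing d with
  | nil => simp [PySem.Set.update_nil]
  | cons x t ih =>
    simp only [List.foldl_cons, PySem.Set.update_cons]
    by_cases h : d.contains x = true
    · rw [if_pos h, ih, PySem.Set.add_of_mem ((PySem.Dict.contains_iff_mem_keys d x).mp h)]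
    · have hx : x ∉ d.keys := fun hm => h ((PySem.Dict.contains_iff_mem_keys d x).mpr hm)
      rw [if_neg h, ih, PySem.Dict.keys_insert_of_not_contains _ _ (by simpa using h),
        PySem.Set.add_of_not_mem hx]

lemma length_ofList_eq_card (xs : List Int) :
    (PySem.Set.ofList xs).length = xs.toFinset.card := by
  have hnd := PySem.Set.nodup_ofList (xs := xs)
  have hfs : (PySem.Set.ofList xs).toFinset = xs.toFinset := by
    ext y; simp [List.mem_toFinset, PySem.Set.mem_ofList]
  rw [← hfs, List.toFinset_card_of_nodup hnd]

-- B's scan from state (c, some p), over a sorted tail all ≥ p, adds the number of distinct values ≠ p.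
lemma scanB (s : List Int) (c : Int) (p : Int)
    (hs : s.Pairwise (· ≤ ·)) (hp : ∀ x ∈ s, p ≤ x) :
    (s.foldl
      (fun (st : Int × Option Int) x =>
        ((if st.2 = none ∨ st.2 ≠ some x then st.1 + 1 else st.1), some x))
      (c, some p)).1 = c + ((s.toFinset.erase p).card : Int) := by
  induction s generalizing c p with
  | nil => simp
  | cons x t ih =>
    have hpw := (List.pairwise_cons.mp hs)
    by_cases hxp : x = p
    · subst hxp
      simp only [List.foldl_cons, List.toFinset_cons]
      rw [if_neg (by simp)]
      rw [ih c x hpw.2 hpw.1, Finset.erase_insert_eq_erase]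
    · have hplt : p < x := lt_of_le_of_ne (hp x (by simp)) (Ne.symm hxp)
      simp only [List.foldl_cons, List.toFinset_cons]
      rw [if_pos (by simp [Ne.symm hxp])]
      rw [ih (c + 1) x hpw.2 hpw.1]
      have hpnot : p ∉ insert x t.toFinset := by
        simp only [Finset.mem_insert, List.mem_toFinset]
        rintro (h | h)
        · exact absurd h.symm (ne_of_gt hplt)
        · exact absurd (hpw.1 p h) (not_le.mpr hplt)
      rw [Finset.erase_eq_of_notMem hpnot]
      have hcard : (insert x t.toFinset).card = (t.toFinset.erase x).card + 1 := by
        by_cases hxt : x ∈ t.toFinset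
        · rw [Finset.insert_eq_self.mpr hxt, Finset.card_erase_of_mem hxt]
          have := Finset.card_pos.mpr ⟨x, hxt⟩
          omega
        · rw [Finset.card_insert_of_notMem hxt, Finset.erase_eq_of_notMem hxt]
      rw [hcard]; push_cast; ring
    
-- distinct count of B equals toFinset.card
lemma foldB (s : List Int) (hs : s.Pairwise (· ≤ ·)) :
    (s.foldl
      (fun (st : Int × Option Int) x =>
        ((if st.2 = none ∨ st.2 ≠ some x then st.1 + 1 else st.1), some x))
      ((0 : Int), (none : Option Int))).1 = (s.toFinset.card : Int) := by
  cases s with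
  | nil => simp
  | cons x t =>
    have hpw := List.pairwise_cons.mp hs
    simp only [List.foldl_cons, List.toFinset_cons]
    rw [if_pos (by simp)]
    rw [scanB t (0 + 1) x hpw.2 hpw.1]
    have hcard : (insert x t.toFinset).card = (t.toFinset.erase x).card + 1 := by
      by_cases hxt : x ∈ t.toFinset
      · rw [Finset.insert_eq_self.mpr hxt, Finset.card_erase_of_mem hxt]
        have := Finset.card_pos.mpr ⟨x, hxt⟩
        omega
      · rw [Finset.card_insert_of_notMem hxt, Finset.erase_eq_of_notMem hxt]
    rw [hcard]; push_cast; ring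

-- ===== VERDICT (by name: the statement is the Claim_ definition above) =====
theorem solution_spec : Claim_equal_solution := by
  intro nums _
  unfold Spec_solution
  simp only [solution, solution_alt]
  have hk := keysA nums PySem.Dict.empty
  rw [PySem.Dict.keys_empty] at hk
  rw [hk, PySem.Set.update_nil_left, length_ofList_eq_card]
  rw [foldB _ (PySem.List.sorted_pairwise nums (fun x => x) )]
  have hfs : (PySem.List.sorted nums (fun x => x) false).toFinset = nums.toFinset := by
    ext y
    simp [List.mem_toFinset, PySem.List.mem_sorted]
  rw [hfs, min_def]
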